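-- pv_equiv track=rewrite | github.com/cussonspoon/All_Python_HW_ | Hw/Hw13/Hw13_66010988_Cusson.py | perm3
-- ===== SOURCE A (Python) =====
-- def perm3(t, count=0):
--     triples = []
--     if count == len(t):
--         return triples
--     for i in t:
--         for j in t:
--             if t[count] != i and t[count] != j and i != j:
--                 triples.append((t[count], i, j))
--     triples += perm3(t, count + 1)
--     return triples
-- ===== SOURCE B (Python) =====
-- def perm3(t, count=0):
--     pairs = [(i, j) for i in t for j in t if i != j]
--     triples = []
--     for ci in range(count, len(t)):
--         v = t[ci]
--         triples.extend((v, i, j) for (i, j) in pairs if v != i and v != j)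
--     return triples
-- ===== Notes on version B (the rewrite author's own statement) =====
-- stated objective: alternative
-- what changed: Replaces the tail recursion over count with a single iterative pass over range(count, len(t)) and hoists the ordered-pair enumeration out of the per-index work: the (i,j) pairs with i!=j are built once and each index's triples are produced by filtering that precomputed pair list, instead of re-running the double loop with the full three-way test at every recursion level.
-- outside the precondition, e.g. on perm3([], -1): A returns [], B raises IndexError
import Mathlib
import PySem

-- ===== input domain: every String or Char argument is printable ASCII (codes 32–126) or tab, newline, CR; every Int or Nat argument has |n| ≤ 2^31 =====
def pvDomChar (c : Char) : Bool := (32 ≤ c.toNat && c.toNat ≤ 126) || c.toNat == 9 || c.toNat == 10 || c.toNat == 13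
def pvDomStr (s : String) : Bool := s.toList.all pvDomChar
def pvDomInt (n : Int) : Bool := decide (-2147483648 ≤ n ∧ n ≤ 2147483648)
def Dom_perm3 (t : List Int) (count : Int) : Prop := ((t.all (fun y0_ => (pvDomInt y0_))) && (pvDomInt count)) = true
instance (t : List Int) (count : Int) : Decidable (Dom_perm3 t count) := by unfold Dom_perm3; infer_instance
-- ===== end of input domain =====

-- B replaces A's recursion over count by one loop over range(count, len(t)) with the
-- ordered-pair list precomputed once; same return values on Pre_ (alternative decomposition, not claimed faster).


-- ===== PORT A =====
def perm3 (t : List Int) (count : Int) : List (Int × Int × Int) :=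
  if count = (t.length : Int) then []
  else
    match hget : PySem.List.pyGet? t count with
    | none => []          -- t[count] raises IndexError in Python (outside Pre_)
    | some tc =>
      (t.foldl (fun acc i =>
        t.foldl (fun acc2 j =>
          if tc ≠ i ∧ tc ≠ j ∧ i ≠ j then acc2 ++ [(tc, i, j)] else acc2) acc) [])
      ++ perm3 t (count + 1)
termination_by ((t.length : Int) - count).toNat
decreasing_by
  have hr : PySem.Raise.InRange t.length count := by
    by_contra hc
    rw [(PySem.List.pyGet?_eq_none_iff t count).2 hc] at hget
    simp at hget
  unfold PySem.Raise.InRange at hr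
  omega

-- ===== PORT B =====
def perm3_alt (t : List Int) (count : Int) : List (Int × Int × Int) :=
  let pairs := t.foldl (fun acc i =>
    t.foldl (fun acc2 j => if i ≠ j then acc2 ++ [(i, j)] else acc2) acc) []
  (PySem.List.pyRange count (t.length : Int) 1).foldl (fun triples ci =>
    match PySem.List.pyGet? t ci with
    | none => triples     -- t[ci] raises IndexError in Python (outside Pre_)
    | some v =>
      triples ++ pairs.foldl (fun acc p =>
        if v ≠ p.1 ∧ v ≠ p.2 then acc ++ [(v, p.1, p.2)] else acc) []) []

-- ===== PRECONDITION & SPEC =====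
-- Pre_ excludes count > len(t) (A raises IndexError / RecursionError) and count < -len(t)
-- (A raises IndexError); on the empty list only the trivial call remains, which excludes a
-- negative count there, a degenerate corner where A happens to return [] while B's range indexing raises.
def Pre_perm3 (t : List Int) (count : Int) : Prop :=
  -(t.length : Int) ≤ count ∧ count ≤ (t.length : Int)
instance (t : List Int) (count : Int) : Decidable (Pre_perm3 t count) := by
  unfold Pre_perm3; infer_instance
def pvWitness_perm3 : List Int × Int := ([2, 5, 7], 0)

def Spec_perm3 (t : List Int) (count : Int) (out : List (Int × Int × Int)) : Prop :=
  out = perm3_alt t count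
instance (t : List Int) (count : Int) (out : List (Int × Int × Int)) : Decidable (Spec_perm3 t count out) := by unfold Spec_perm3; infer_instance

-- ===== CLAIM (what is proved, stated in full; the proofs are below) =====
def Claim_equal_perm3 : Prop := ∀ (t : List Int) (count : Int), Dom_perm3 t count → Pre_perm3 t count → Spec_perm3 t count (perm3 t count)

-- ===== LEMMAS AND PROOFS =====

-- A's per-level block, in flatMap/filter normal form
theorem perm3_blockA_eq (t : List Int) (tc : Int) :
    t.foldl (fun acc i => t.foldl (fun acc2 j =>
        if tc ≠ i ∧ tc ≠ j ∧ i ≠ j then acc2 ++ [(tc, i, j)] else acc2) acc) []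
    = t.flatMap (fun i =>
        (t.filter (fun j => decide (tc ≠ i ∧ tc ≠ j ∧ i ≠ j))).map (fun j => (tc, i, j))) := by
  have h : (fun (acc : List (Int × Int × Int)) (i : Int) => t.foldl (fun acc2 j => if tc ≠ i ∧ tc ≠ j ∧ i ≠ j then acc2 ++ [(tc, i, j)] else acc2) acc)
      = fun acc i => acc ++ (t.filter (fun j => decide (tc ≠ i ∧ tc ≠ j ∧ i ≠ j))).map (fun j => (tc, i, j)) := by
    funext acc i
    exact PySem.List.foldl_append_ite (p := fun j => tc ≠ i ∧ tc ≠ j ∧ i ≠ j) (fun j => (tc, i, j)) t acc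
  rw [h, PySem.List.foldl_append_eq_flatMap]
  simp

-- B's pair list, in flatMap normal form
theorem perm3_pairs_eq (t : List Int) :
    t.foldl (fun acc i => t.foldl (fun acc2 j =>
        if i ≠ j then acc2 ++ [(i, j)] else acc2) acc) []
    = t.flatMap (fun i => (t.filter (fun j => decide (i ≠ j))).map (fun j => (i, j))) := by
  have h : (fun (acc : List (Int × Int)) (i : Int) => t.foldl (fun acc2 j => if i ≠ j then acc2 ++ [(i, j)] else acc2) acc)
      = fun acc i => acc ++ (t.filter (fun j => decide (i ≠ j))).map (fun j => (i, j)) := by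
    funext acc i
    exact PySem.List.foldl_append_ite (p := fun j => i ≠ j) (fun j => (i, j)) t acc
  rw [h, PySem.List.foldl_append_eq_flatMap]
  simp

-- B's per-index block equals A's per-level block
theorem perm3_block_eq (t : List Int) (v : Int) :
    (t.flatMap (fun i => (t.filter (fun j => decide (i ≠ j))).map (fun j => (i, j)))).foldl
        (fun acc p => if v ≠ p.1 ∧ v ≠ p.2 then acc ++ [(v, p.1, p.2)] else acc) []
    = t.foldl (fun acc i => t.foldl (fun acc2 j =>
        if v ≠ i ∧ v ≠ j ∧ i ≠ j then acc2 ++ [(v, i, j)] else acc2) acc) [] := by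
  rw [PySem.List.foldl_append_ite (p := fun p : Int × Int => v ≠ p.1 ∧ v ≠ p.2)
      (fun p => (v, p.1, p.2)) _ [], perm3_blockA_eq]
  simp only [List.nil_append, List.filter_flatMap, List.map_flatMap, List.filter_map, List.map_map]
  apply List.flatMap_congr
  intro i _
  rw [List.filter_filter]
  congr 1
  apply List.filter_congr
  intro j _
  simp [Function.comp, Bool.and_assoc]

-- B as a flatMap over the index range
theorem perm3_alt_eq_flatMap (t : List Int) (count : Int) :
    perm3_alt t count = (PySem.List.pyRange count (t.length : Int) 1).flatMap (fun ci =>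
      match PySem.List.pyGet? t ci with
      | none => []
      | some v => t.foldl (fun acc i => t.foldl (fun acc2 j =>
          if v ≠ i ∧ v ≠ j ∧ i ≠ j then acc2 ++ [(v, i, j)] else acc2) acc) []) := by
  unfold perm3_alt
  simp only [perm3_pairs_eq, perm3_block_eq]
  have hb : (fun (triples : List (Int × Int × Int)) (ci : Int) =>
      match PySem.List.pyGet? t ci with
      | none => triples
      | some v => triples ++ t.foldl (fun acc i => t.foldl (fun acc2 j =>
          if v ≠ i ∧ v ≠ j ∧ i ≠ j then acc2 ++ [(v, i, j)] else acc2) acc) [])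
      = fun triples ci => triples ++ (match PySem.List.pyGet? t ci with
      | none => []
      | some v => t.foldl (fun acc i => t.foldl (fun acc2 j =>
          if v ≠ i ∧ v ≠ j ∧ i ≠ j then acc2 ++ [(v, i, j)] else acc2) acc) []) := by
    funext triples ci
    cases PySem.List.pyGet? t ci <;> simp
  rw [hb, PySem.List.foldl_append_eq_flatMap]
  simp

-- A equals the same flatMap over the index range, by induction on len - count
theorem perm3_eq_flatMap (t : List Int) : ∀ (n : Nat) (count : Int),
    -(t.length : Int) ≤ count → count ≤ (t.length : Int) →
    ((t.length : Int) - count).toNat = n →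
    perm3 t count = (PySem.List.pyRange count (t.length : Int) 1).flatMap (fun ci =>
      match PySem.List.pyGet? t ci with
      | none => []
      | some v => t.foldl (fun acc i => t.foldl (fun acc2 j =>
          if v ≠ i ∧ v ≠ j ∧ i ≠ j then acc2 ++ [(v, i, j)] else acc2) acc) []) := by
  intro n
  induction n with
  | zero =>
    intro count h1 h2 h3
    have hc : count = (t.length : Int) := by omega
    rw [perm3, if_pos hc, PySem.List.pyRange_one_eq_nil (by omega)]
    rfl
  | succ n ih =>
    intro count h1 h2 h3
    have hlt : count < (t.length : Int) := by omega
    obtain ⟨tc, htc⟩ : ∃ tc, PySem.List.pyGet? t count = some tc := by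
      cases h : PySem.List.pyGet? t count with
      | none =>
        have := (PySem.List.pyGet?_eq_none_iff t count).1 h
        unfold PySem.Raise.InRange at this
        omega
      | some v => exact ⟨v, rfl⟩
    rw [perm3, if_neg (by omega), htc]
    rw [PySem.List.pyRange_one_cons (by omega), List.flatMap_cons, htc]
    dsimp only
    congr 1
    exact ih (count + 1) (by omega) (by omega) (by omega)

-- ===== VERDICT (by name: the statement is the Claim_ definition above) =====
theorem perm3_spec : Claim_equal_perm3 := by
  intro t count _ hpre
  unfold Spec_perm3
  rw [perm3_alt_eq_flatMap, perm3_eq_flatMap t ((((t.length : Int)) - count).toNat) count hpre.1 hpre.2 rfl]
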